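-- pv_equiv track=rewrite | github.com/cucuwritescode/conformer-acr | mutate.py | inject_altered_dominant
-- ===== SOURCE A (Python) =====
-- from typing import Dict, List, Tuple, Optional
--
-- def get_outer_voices(pitches: List[int]) -> Tuple[int, int]:
--     """
--     Get the highest (melody) and lowest (bass) pitches from a chord.
--
--     Parameters
--     ----------
--     pitches : list of int
--         MIDI pitch values.
--
--     Returns
--     -------
--     tuple
--         (highest_pitch, lowest_pitch)
--     """
--     if not pitches:
--         return (0, 0)
--     return (max(pitches), min(pitches))
--
-- def inject_altered_dominant(pitches: List[int], alteration: str = "b9") -> List[int]: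
--     """
--     Inject b9 or #9 into a dominant 7th chord.
--
--     Preserves root, 3rd, and 7th. The 5th may be replaced or the alteration added.
--
--     Parameters
--     ----------
--     pitches : list of int
--         Original chord pitches (must be dominant 7th).
--     alteration : str
--         "b9" for flat 9, "#9" for sharp 9.
--
--     Returns
--     -------
--     list of int
--         Mutated pitches with alteration added.
--     """
--     if len(pitches) < 4:
--         return pitches
--
--     pitches = pitches.copy()
--     root = min(pitches)
--     high, low = get_outer_voices(pitches)
--
--     #calculate alteration pitch
--     if alteration == "b9":
--         #b9 = 1 semitone above root (enharmonic)
--         alt_pitch = root + 13  # octave + 1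
--     else:  # #9
--         #sharp 9 = 3 semitones above root (enharmonic to minor 3rd)
--         alt_pitch = root + 15  # octave + 3
--
--     #ensure alteration doesn't exceed melody
--     while alt_pitch > high:
--         alt_pitch -= 12
--
--     #ensure alteration doesn't go below bass
--     while alt_pitch < low:
--         alt_pitch += 12
--
--     #if still conflicts with outer voices, place in middle
--     if alt_pitch >= high or alt_pitch <= low:
--         alt_pitch = root + 13 if alteration == "b9" else root + 15
--         while alt_pitch >= high:
--             alt_pitch -= 12
--         while alt_pitch <= low:
--             alt_pitch += 12
--
--     #add alteration (don't remove existing notes to preserve chord identity)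
--     if alt_pitch not in pitches and low < alt_pitch < high:
--         pitches.append(alt_pitch)
--
--     return pitches
-- ===== SOURCE B (Python) =====
-- def _down_to(x, bound):
--     # largest x - 12k (k >= 0) that is <= bound
--     if x <= bound:
--         return x
--     return x - 12 * ((x - bound + 11) // 12)
--
-- def _up_to(x, bound):
--     # smallest x + 12k (k >= 0) that is >= bound
--     if x >= bound:
--         return x
--     return x + 12 * ((bound - x + 11) // 12)
--
-- def inject_altered_dominant(pitches, alteration="b9"):
--     if len(pitches) < 4:
--         return pitches
--     pitches = pitches.copy()
--     root = min(pitches)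
--     high, low = max(pitches), root
--     start = root + 13 if alteration == "b9" else root + 15
--     alt_pitch = _up_to(_down_to(start, high), low)
--     if alt_pitch >= high or alt_pitch <= low:
--         alt_pitch = _up_to(_down_to(start, high - 1), low + 1)
--     if alt_pitch not in pitches and low < alt_pitch < high:
--         pitches.append(alt_pitch)
--     return pitches
-- ===== Notes on version B (the rewrite author's own statement) =====
-- stated objective: simpler
-- what changed: Each of A's four octave-shifting while-loops is replaced by a closed-form integer-division shift (one arithmetic step per normalization), keeping the same two-stage strict/non-strict bound structure.
import Mathlib
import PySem

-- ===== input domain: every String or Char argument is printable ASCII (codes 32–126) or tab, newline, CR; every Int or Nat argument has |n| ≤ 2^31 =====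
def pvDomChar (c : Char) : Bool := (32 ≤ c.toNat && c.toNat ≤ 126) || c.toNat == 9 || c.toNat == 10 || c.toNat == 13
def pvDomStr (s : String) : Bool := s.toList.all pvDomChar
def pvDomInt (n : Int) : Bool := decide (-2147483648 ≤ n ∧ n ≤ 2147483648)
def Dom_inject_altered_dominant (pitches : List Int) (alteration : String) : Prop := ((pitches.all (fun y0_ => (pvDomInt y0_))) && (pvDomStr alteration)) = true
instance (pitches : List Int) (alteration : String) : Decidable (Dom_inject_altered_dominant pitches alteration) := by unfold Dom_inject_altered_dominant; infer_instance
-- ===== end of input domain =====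

-- B replaces A's four octave-shifting while-loops with closed-form integer-division shifts (objective: simpler, loop-free normalization).

-- ===== PORT A =====
def get_outer_voices (pitches : List Int) : Int × Int :=
  if pitches = [] then (0, 0)
  else (((PySem.List.max? pitches (fun x => x)).getD 0), ((PySem.List.min? pitches (fun x => x)).getD 0))

-- while alt_pitch > high: alt_pitch -= 12
def loopDown (alt high : Int) : Int :=
  if alt > high then loopDown (alt - 12) high else alt
termination_by (alt - high).toNat
decreasing_by omega

-- while alt_pitch < low: alt_pitch += 12
def loopUp (alt low : Int) : Int :=
  if alt < low then loopUp (alt + 12) low else alt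
termination_by (low - alt).toNat
decreasing_by omega

-- while alt_pitch >= high: alt_pitch -= 12
def loopDownGE (alt high : Int) : Int :=
  if alt ≥ high then loopDownGE (alt - 12) high else alt
termination_by (alt - high + 1).toNat
decreasing_by omega

-- while alt_pitch <= low: alt_pitch += 12
def loopUpLE (alt low : Int) : Int :=
  if alt ≤ low then loopUpLE (alt + 12) low else alt
termination_by (low - alt + 1).toNat
decreasing_by omega

def inject_altered_dominant (pitches : List Int) (alteration : String) : List Int :=
  if pitches.length < 4 then pitches
  else
    let root := (PySem.List.min? pitches (fun x => x)).getD 0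
    let hl := get_outer_voices pitches
    let high := hl.1
    let low := hl.2
    let alt0 := if alteration = "b9" then root + 13 else root + 15
    let alt1 := loopUp (loopDown alt0 high) low
    let alt2 :=
      if alt1 ≥ high ∨ alt1 ≤ low then
        loopUpLE (loopDownGE (if alteration = "b9" then root + 13 else root + 15) high) low
      else alt1
    if alt2 ∉ pitches ∧ low < alt2 ∧ alt2 < high then pitches ++ [alt2] else pitches

-- ===== PORT B =====
-- largest x - 12k (k ≥ 0) that is ≤ bound
def downTo (x bound : Int) : Int :=
  if x ≤ bound then x else x - 12 * PySem.Int.floordiv (x - bound + 11) 12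

-- smallest x + 12k (k ≥ 0) that is ≥ bound
def upTo (x bound : Int) : Int :=
  if x ≥ bound then x else x + 12 * PySem.Int.floordiv (bound - x + 11) 12

def inject_altered_dominant_alt (pitches : List Int) (alteration : String) : List Int :=
  if pitches.length < 4 then pitches
  else
    let root := (PySem.List.min? pitches (fun x => x)).getD 0
    let high := (PySem.List.max? pitches (fun x => x)).getD 0
    let low := root
    let start := if alteration = "b9" then root + 13 else root + 15
    let alt1 := upTo (downTo start high) low
    let alt2 :=
      if alt1 ≥ high ∨ alt1 ≤ low then upTo (downTo start (high - 1)) (low + 1)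
      else alt1
    if alt2 ∉ pitches ∧ low < alt2 ∧ alt2 < high then pitches ++ [alt2] else pitches

-- ===== PRECONDITION & SPEC =====
def Spec_inject_altered_dominant (pitches : List Int) (alteration : String) (out : List Int) : Prop := out = inject_altered_dominant_alt pitches alteration
instance (pitches : List Int) (alteration : String) (out : List Int) : Decidable (Spec_inject_altered_dominant pitches alteration out) := by unfold Spec_inject_altered_dominant; infer_instance

-- ===== CLAIM (what is proved, stated in full; the proofs are below) =====
def Claim_equal_inject_altered_dominant : Prop := ∀ (pitches : List Int) (alteration : String), Dom_inject_altered_dominant pitches alteration → Spec_inject_altered_dominant pitches alteration (inject_altered_dominant pitches alteration)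

-- ===== LEMMAS AND PROOFS =====
theorem loopDown_eq (alt high : Int) : loopDown alt high = downTo alt high := by
  unfold downTo
  rw [PySem.Int.floordiv_eq_ediv_of_pos (by omega)]
  induction alt using loopDown.induct (high := high) with
  | case1 alt h ih =>
    conv_lhs => rw [loopDown]
    rw [if_pos h]
    rw [ih]
    split_ifs with h1 h2 h2 <;> omega
  | case2 alt h =>
    conv_lhs => rw [loopDown]
    rw [if_neg h]
    split_ifs with h1 <;> omega

theorem loopUp_eq (alt low : Int) : loopUp alt low = upTo alt low := by
  unfold upTo
  rw [PySem.Int.floordiv_eq_ediv_of_pos (by omega)]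
  induction alt using loopUp.induct (low := low) with
  | case1 alt h ih =>
    conv_lhs => rw [loopUp]
    rw [if_pos h]
    rw [ih]
    split_ifs with h1 h2 h2 <;> omega
  | case2 alt h =>
    conv_lhs => rw [loopUp]
    rw [if_neg h]
    split_ifs with h1 <;> omega

theorem loopDownGE_eq (alt high : Int) : loopDownGE alt high = downTo alt (high - 1) := by
  unfold downTo
  rw [PySem.Int.floordiv_eq_ediv_of_pos (by omega)]
  induction alt using loopDownGE.induct (high := high) with
  | case1 alt h ih =>
    conv_lhs => rw [loopDownGE]
    rw [if_pos h]
    rw [ih]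
    split_ifs with h1 h2 h2 <;> omega
  | case2 alt h =>
    conv_lhs => rw [loopDownGE]
    rw [if_neg h]
    split_ifs with h1 <;> omega

theorem loopUpLE_eq (alt low : Int) : loopUpLE alt low = upTo alt (low + 1) := by
  unfold upTo
  rw [PySem.Int.floordiv_eq_ediv_of_pos (by omega)]
  induction alt using loopUpLE.induct (low := low) with
  | case1 alt h ih =>
    conv_lhs => rw [loopUpLE]
    rw [if_pos h]
    rw [ih]
    split_ifs with h1 h2 h2 <;> omega
  | case2 alt h =>
    conv_lhs => rw [loopUpLE]
    rw [if_neg h]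
    split_ifs with h1 <;> omega

theorem get_outer_voices_of_len (pitches : List Int) (h : ¬ pitches.length < 4) :
    get_outer_voices pitches =
      ((PySem.List.max? pitches (fun x => x)).getD 0, (PySem.List.min? pitches (fun x => x)).getD 0) := by
  unfold get_outer_voices
  have : pitches ≠ [] := by intro he; subst he; simp at h
  simp [this]

-- ===== VERDICT (by name: the statement is the Claim_ definition above) =====
theorem inject_altered_dominant_spec : Claim_equal_inject_altered_dominant := by
  intro pitches alteration _
  unfold Spec_inject_altered_dominant inject_altered_dominant inject_altered_dominant_alt
  by_cases hlen : pitches.length < 4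
  · simp [hlen]
  · simp only [hlen, if_false, get_outer_voices_of_len pitches hlen,
      loopDown_eq, loopUp_eq, loopDownGE_eq, loopUpLE_eq]
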